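-- pv_equiv track=rewrite | github.com/dev-riley/SSAFY_Algorithm | IM 보충/보충1/1220_magnetic.py | solve
-- ===== SOURCE A (Python) =====
-- def solve(arr, N):
--     cnt = 0
--     for c in range(N):
--         flag = 0    # N극을 못 찾음
--         for r in range(N):
--             if flag == 0 and arr[r][c] == 1: # N극을 찾음
--                 flag = 1    # N극 찾아서 표시
--             elif flag == 1 and arr[r][c] == 2: # N극을 찾은 상태에서 S극을 찾음
--                 cnt += 1
--                 flag = 0
--     return cnt
-- ===== SOURCE B (Python) =====
-- def solve(arr, N):
--     total = 0
--     for c in range(N):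
--         # stage 1: extract the column's pole values (1s and 2s only), top to bottom
--         poles = [arr[r][c] for r in range(N) if arr[r][c] in (1, 2)]
--         # stage 2: collapse runs of identical consecutive poles
--         collapsed = []
--         for v in poles:
--             if not collapsed or collapsed[-1] != v:
--                 collapsed.append(v)
--         # stage 3: count N->S transitions (a 1 immediately followed by a 2)
--         total += sum(1 for a, b in zip(collapsed, collapsed[1:]) if a == 1 and b == 2)
--     return total
-- ===== Notes on version B (the rewrite author's own statement) =====
-- stated objective: alternative
-- what changed: Replaces A's inline flag state machine with an explicit per-column three-stage pipeline: filter the column to pole values, collapse consecutive duplicate poles, then count adjacent (1,2) pairs.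
import Mathlib
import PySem

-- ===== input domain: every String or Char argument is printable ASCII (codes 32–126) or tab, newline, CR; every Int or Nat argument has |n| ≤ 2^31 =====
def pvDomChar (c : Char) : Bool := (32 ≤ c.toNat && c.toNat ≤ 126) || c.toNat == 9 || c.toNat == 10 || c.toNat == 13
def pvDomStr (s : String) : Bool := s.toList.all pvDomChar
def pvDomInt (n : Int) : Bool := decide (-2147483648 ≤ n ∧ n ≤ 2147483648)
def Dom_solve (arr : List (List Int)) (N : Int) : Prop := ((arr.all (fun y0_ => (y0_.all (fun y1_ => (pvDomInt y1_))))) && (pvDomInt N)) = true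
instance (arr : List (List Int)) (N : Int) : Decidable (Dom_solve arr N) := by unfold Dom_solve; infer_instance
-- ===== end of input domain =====

-- B replaces A's inline flag state machine with an explicit per-column pipeline:
-- filter to pole values, collapse consecutive duplicates, count adjacent (1,2) pairs.

-- arr[r][c] (total helper used by both ports; under Pre_solve both pyGet? hit)
def pvGetRC (arr : List (List Int)) (r c : Int) : Int :=
  (PySem.List.pyGet? ((PySem.List.pyGet? arr r).getD []) c).getD 0

-- ===== PORT A =====
-- A's inner-loop body: the two-branch flag/count state machine on one cell value
def pvStepA (st : Int × Int) (v : Int) : Int × Int :=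
  if st.1 = 0 ∧ v = 1 then (1, st.2)
  else if st.1 = 1 ∧ v = 2 then (0, st.2 + 1)
  else st

def solve (arr : List (List Int)) (N : Int) : Int :=
  (PySem.List.pyRange 0 N 1).foldl (fun cnt c =>
    ((PySem.List.pyRange 0 N 1).foldl
      (fun st r => pvStepA st (pvGetRC arr r c)) (0, cnt)).2) 0

-- ===== PORT B =====
-- B's collapse-loop body: append v unless it repeats the last collapsed value
def pvCollapseStep (acc : List Int) (v : Int) : List Int :=
  if acc = [] ∨ PySem.List.pyGet? acc (-1) ≠ some v then acc ++ [v] else acc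

def solve_alt (arr : List (List Int)) (N : Int) : Int :=
  (PySem.List.pyRange 0 N 1).foldl (fun total c =>
    let poles := ((PySem.List.pyRange 0 N 1).map (fun r => pvGetRC arr r c)).filter
                   (fun v => v == 1 || v == 2)
    let collapsed := poles.foldl pvCollapseStep []
    total + (collapsed.zip (PySem.List.slice collapsed (some 1) none)).foldl
              (fun s ab => s + if ab.1 = 1 ∧ ab.2 = 2 then 1 else 0) 0) 0

-- ===== PRECONDITION & SPEC =====
-- Pre_ excludes exactly the inputs on which A raises IndexError: a row index or a
-- column index reaching outside arr.
def Pre_solve (arr : List (List Int)) (N : Int) : Prop :=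
  N ≤ arr.length ∧ ∀ row ∈ arr.take N.toNat, N ≤ row.length
instance (arr : List (List Int)) (N : Int) : Decidable (Pre_solve arr N) := by
  unfold Pre_solve; infer_instance
def pvWitness_solve : List (List Int) × Int := ([[1, 2], [2, 1]], 2)

def Spec_solve (arr : List (List Int)) (N : Int) (out : Int) : Prop := out = solve_alt arr N
instance (arr : List (List Int)) (N : Int) (out : Int) : Decidable (Spec_solve arr N out) := by unfold Spec_solve; infer_instance

-- ===== CLAIM (what is proved, stated in full; the proofs are below) =====
def Claim_equal_solve : Prop := ∀ (arr : List (List Int)) (N : Int), Dom_solve arr N → Pre_solve arr N → Spec_solve arr N (solve arr N)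

-- ===== LEMMAS AND PROOFS =====

-- A's state machine on a list of cell values, returning the count it adds
def pvMach : Int → List Int → Int
  | f, [] => 0
  | f, x :: xs =>
    if f = 0 ∧ x = 1 then pvMach 1 xs
    else if f = 1 ∧ x = 2 then 1 + pvMach 0 xs
    else pvMach f xs

-- collapse of a list given the previous (last kept) value
def pvRcFrom : Int → List Int → List Int
  | _, [] => []
  | l, x :: xs => if x = l then pvRcFrom l xs else x :: pvRcFrom x xs

-- number of adjacent (1,2) pairs
def pvPairs : List Int → Int
  | [] => 0
  | [_] => 0
  | x :: y :: t => (if x = 1 ∧ y = 2 then 1 else 0) + pvPairs (y :: t)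

theorem pvFoldA_snd (xs : List Int) : ∀ (f cnt : Int),
    (List.foldl pvStepA (f, cnt) xs).2 = cnt + pvMach f xs := by
  induction xs with
  | nil => intro f cnt; simp [pvMach]
  | cons x xs ih =>
    intro f cnt
    simp only [List.foldl_cons, pvStepA, pvMach]
    split_ifs <;> simp [ih] <;> omega

theorem pvMach_filter (xs : List Int) : ∀ f : Int,
    pvMach f (xs.filter (fun v => v == 1 || v == 2)) = pvMach f xs := by
  induction xs with
  | nil => intro f; simp
  | cons x xs ih =>
    intro f
    by_cases hx : (x == 1 || x == 2) = true
    · simp only [List.filter_cons, hx, if_pos, pvMach]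
      split_ifs <;> simp [ih]
    · have h2 : ¬(x = 1 ∨ x = 2) := by simpa using hx
      have hstep : pvMach f (x :: xs) = pvMach f xs := by
        simp only [pvMach]
        rw [if_neg (fun h => h2 (Or.inl h.2)), if_neg (fun h => h2 (Or.inr h.2))]
      rw [List.filter_cons, if_neg hx, ih f, hstep]

theorem pvPairs_two_cons (l : List Int) : pvPairs (2 :: l) = pvPairs l := by
  cases l with
  | nil => rfl
  | cons x t => simp [pvPairs]

theorem pvMach_pairs (xs : List Int) (h : ∀ v ∈ xs, v = 1 ∨ v = 2) :
    pvMach 0 xs = pvPairs (2 :: pvRcFrom 2 xs) ∧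
    pvMach 1 xs = pvPairs (1 :: pvRcFrom 1 xs) := by
  induction xs with
  | nil => simp [pvMach, pvRcFrom, pvPairs]
  | cons x xs ih =>
    have hx := h x (by simp)
    have hxs : ∀ v ∈ xs, v = 1 ∨ v = 2 := fun v hv => h v (by simp [hv])
    obtain ⟨ih0, ih1⟩ := ih hxs
    rcases hx with hx | hx <;> subst hx
    · constructor
      · simp only [pvMach, pvRcFrom]
        norm_num
        rw [pvPairs_two_cons]
        exact ih1
      · simp only [pvMach, pvRcFrom]
        norm_num
        exact ih1
    · constructor
      · simp only [pvMach, pvRcFrom]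
        norm_num
        exact ih0
      · simp only [pvMach, pvRcFrom]
        norm_num
        rw [ih0]
        rw [show pvPairs (1 :: 2 :: pvRcFrom 2 xs) = 1 + pvPairs (2 :: pvRcFrom 2 xs) by
          simp [pvPairs]]

theorem pvCollapseStep_eq (acc : List Int) (l v : Int) (hne : acc ≠ [])
    (hl : acc.getLast? = some l) :
    pvCollapseStep acc v = if v = l then acc else acc ++ [v] := by
  unfold pvCollapseStep
  rw [PySem.List.pyGet?_neg_one, hl]
  by_cases hv : v = l
  · subst hv
    rw [if_neg (by simp [hne]), if_pos rfl]
  · rw [if_pos (Or.inr (by simpa using Ne.symm hv)), if_neg hv]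

theorem pvCollapse_fold (xs : List Int) : ∀ (acc : List Int) (l : Int),
    acc.getLast? = some l → List.foldl pvCollapseStep acc xs = acc ++ pvRcFrom l xs := by
  induction xs with
  | nil => intro acc l _; simp [pvRcFrom]
  | cons v xs ih =>
    intro acc l hl
    have hne : acc ≠ [] := by intro h; subst h; simp at hl
    rw [List.foldl_cons, pvCollapseStep_eq acc l v hne hl]
    by_cases hv : v = l
    · subst hv
      rw [if_pos rfl, ih acc v hl]
      simp [pvRcFrom]
    · rw [if_neg hv, ih (acc ++ [v]) v (by simp)]
      simp [pvRcFrom, hv]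

theorem pvZipFold (l : List Int) : ∀ s : Int,
    (l.zip (l.drop 1)).foldl (fun s ab => s + if ab.1 = 1 ∧ ab.2 = 2 then 1 else 0) s
      = s + pvPairs l := by
  induction l with
  | nil => intro s; simp [pvPairs]
  | cons x rest ih =>
    intro s
    cases rest with
    | nil => simp [pvPairs]
    | cons y t =>
      simp only [List.drop_succ_cons, List.drop_zero, List.zip_cons_cons, List.foldl_cons]
      rw [show (y :: t).zip t = (y :: t).zip ((y :: t).drop 1) by simp]
      rw [ih]
      simp [pvPairs]; ring

theorem pvCol_eq (arr : List (List Int)) (N c cnt : Int) :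
    ((PySem.List.pyRange 0 N 1).foldl
        (fun st r => pvStepA st (pvGetRC arr r c)) (0, cnt)).2
    = cnt +
      (((((PySem.List.pyRange 0 N 1).map (fun r => pvGetRC arr r c)).filter
            (fun v => v == 1 || v == 2)).foldl pvCollapseStep []).zip
         (PySem.List.slice
           ((((PySem.List.pyRange 0 N 1).map (fun r => pvGetRC arr r c)).filter
               (fun v => v == 1 || v == 2)).foldl pvCollapseStep []) (some 1) none)).foldl
        (fun s ab => s + if ab.1 = 1 ∧ ab.2 = 2 then 1 else 0) 0 := by
  have hmap : List.foldl (fun st r => pvStepA st (pvGetRC arr r c)) ((0 : Int), cnt)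
      (PySem.List.pyRange 0 N 1)
      = List.foldl pvStepA ((0 : Int), cnt)
          ((PySem.List.pyRange 0 N 1).map (fun r => pvGetRC arr r c)) := by
    rw [List.foldl_map]
  rw [hmap, pvFoldA_snd]
  congr 1
  set col := (PySem.List.pyRange 0 N 1).map (fun r => pvGetRC arr r c) with hcol
  rw [← pvMach_filter col 0]
  set poles := col.filter (fun v => v == 1 || v == 2) with hp
  have hmem : ∀ v ∈ poles, v = 1 ∨ v = 2 := by
    intro v hv
    have := List.of_mem_filter hv
    simpa using this
  rw [show PySem.List.slice (poles.foldl pvCollapseStep []) (some 1) none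
        = (poles.foldl pvCollapseStep []).drop 1 by
      rw [PySem.List.slice_from_one, ← List.drop_one]]
  cases hpl : poles with
  | nil => simp [pvMach]
  | cons y t =>
    have hy : y = 1 ∨ y = 2 := hmem y (by simp [hpl])
    have hmt : ∀ v ∈ t, v = 1 ∨ v = 2 := fun v hv => hmem v (by simp [hpl, hv])
    have hfold : List.foldl pvCollapseStep [] (y :: t) = y :: pvRcFrom y t := by
      rw [List.foldl_cons, show pvCollapseStep [] y = [y] by simp [pvCollapseStep]]
      simpa using pvCollapse_fold t [y] y (by simp)
    rw [hfold, pvZipFold]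
    have := pvMach_pairs (y :: t) (by rintro v hv; rcases List.mem_cons.1 hv with h | h
                                      · exact h ▸ hy
                                      · exact hmt v h)
    rw [this.1]
    rcases hy with hy | hy <;> subst hy
    · simp only [pvRcFrom, if_neg (by norm_num : (1 : Int) ≠ 2)]
      rw [pvPairs_two_cons]
      simp
    · simp only [pvRcFrom, if_pos rfl]
      simp

theorem pvFoldlCongr (f g : Int → Int → Int) (h : ∀ a x, f a x = g a x) :
    ∀ (l : List Int) (a : Int), List.foldl f a l = List.foldl g a l := by
  intro l
  induction l with
  | nil => intro a; rfl
  | cons x t ih => intro a; rw [List.foldl_cons, List.foldl_cons, h, ih]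

-- ===== VERDICT (by name: the statement is the Claim_ definition above) =====
theorem solve_spec : Claim_equal_solve := by
  intro arr N _ _
  unfold Spec_solve solve solve_alt
  exact pvFoldlCongr _ _ (fun cnt c => pvCol_eq arr N c cnt) (PySem.List.pyRange 0 N 1) 0
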